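-- pv_equiv track=rewrite | github.com/MattiaBaldinetti/PythonExercises | Lezione_4.py | freq_lettera_finale
-- ===== SOURCE A (Python) =====
-- def freq_lettera_finale(lista_stringhe):
--     diz = {}
--     for stringa in lista_stringhe:
--         lettera = stringa[-1]
--         diz[lettera] = diz.get(lettera, 0) + 1
--     # diz contiene le frequenze a fine stringa di tutte
--     # le lettere che compaiono almeno una volta a fine
--     # stringa diz={'n':2, 'r':1, 'a':1}
--     freq_massima = 0
--     char = 'z'
--     for k in diz.keys():
--         if diz[k] > freq_massima:
--             freq_massima = diz[k]
--             char = k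
--         elif diz[k] == freq_massima and char > k:
--             char = k
--     return char
-- ===== SOURCE B (Python) =====
-- def freq_lettera_finale(lista_stringhe):
--     finali = sorted(s[-1] for s in lista_stringhe)
--     best_char = 'z'
--     best_count = 0
--     run_char = None
--     run_len = 0
--     for c in finali:
--         if c == run_char:
--             run_len += 1
--         else:
--             run_char = c
--             run_len = 1
--         if run_len > best_count:
--             best_count = run_len
--             best_char = c
--     return best_char
-- ===== Notes on version B (the rewrite author's own statement) =====
-- stated objective: alternative
-- what changed: B replaces A's dict-counting pass plus max/tie scan over the keys by sorting the final letters and doing one run-length scan, where ascending order yields the alphabetical tie-break for free.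
import Mathlib
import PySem

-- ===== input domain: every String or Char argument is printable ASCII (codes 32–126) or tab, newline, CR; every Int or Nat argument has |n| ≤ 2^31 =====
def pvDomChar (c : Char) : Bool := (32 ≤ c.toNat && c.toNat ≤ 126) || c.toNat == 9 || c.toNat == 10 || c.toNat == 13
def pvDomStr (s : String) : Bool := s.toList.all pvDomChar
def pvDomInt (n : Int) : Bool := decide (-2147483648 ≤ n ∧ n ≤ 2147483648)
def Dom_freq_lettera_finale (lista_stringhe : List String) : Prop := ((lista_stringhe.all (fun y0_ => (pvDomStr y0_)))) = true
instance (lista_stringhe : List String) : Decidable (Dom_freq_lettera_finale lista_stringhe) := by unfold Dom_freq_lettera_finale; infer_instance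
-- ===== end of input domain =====

-- B sorts the final letters and keeps the first run whose length strictly beats the best so far;
-- A counts in a dict and scans the keys.  Equivalence is about the return value on lists of
-- nonempty strings (Python raises IndexError on "" in both versions, excluded by Pre_).

-- shared indexing helper: Python's  stringa[-1]  (junk ' ' outside Pre_, where Python raises)
def pvLast (stringa : String) : Char := (PySem.Str.pyGet? stringa (-1)).getD ' '

-- ===== PORT A =====
-- loop body of A's second for-loop (k over diz.keys; state = (freq_massima, char))
def pvStepA (cnt : Char → Int) (st : Int × Char) (k : Char) : Int × Char :=
  if cnt k > st.1 then (cnt k, k)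
  else if cnt k = st.1 ∧ st.2 > k then (st.1, k)
  else st

def freq_lettera_finale (lista_stringhe : List String) : String :=
  let diz := lista_stringhe.foldl (fun d stringa =>
      let lettera := pvLast stringa
      d.insert lettera (d.getD lettera 0 + 1)) PySem.Dict.empty
  let fin := diz.keys.foldl (pvStepA (fun k => diz.getD k 0)) (0, 'z')
  String.singleton fin.2

-- ===== PORT B =====
-- loop body of B's for-loop; state = (best_char, best_count, run_char, run_len)
def pvStepB (st : Char × Int × Option Char × Int) (c : Char) : Char × Int × Option Char × Int :=
  let r : Option Char × Int := if some c = st.2.2.1 then (st.2.2.1, st.2.2.2 + 1) else (some c, 1)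
  if r.2 > st.2.1 then (c, r.2, r.1, r.2) else (st.1, st.2.1, r.1, r.2)

def freq_lettera_finale_alt (lista_stringhe : List String) : String :=
  let finali := PySem.List.sorted (lista_stringhe.map pvLast) (fun c => c) false
  let st := finali.foldl pvStepB ('z', 0, none, 0)
  String.singleton st.1

-- ===== PRECONDITION & SPEC =====
-- Pre_ excludes lists containing an empty string: there Python A raises IndexError on stringa[-1] (B raises too).
def Pre_freq_lettera_finale (lista_stringhe : List String) : Prop :=
  (lista_stringhe.all (fun s => !s.toList.isEmpty)) = true
instance (lista_stringhe : List String) : Decidable (Pre_freq_lettera_finale lista_stringhe) := by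
  unfold Pre_freq_lettera_finale; infer_instance

def pvWitness_freq_lettera_finale : List String := ["ciao", "mare", "sole"]

def Spec_freq_lettera_finale (lista_stringhe : List String) (out : String) : Prop := out = freq_lettera_finale_alt lista_stringhe
instance (lista_stringhe : List String) (out : String) : Decidable (Spec_freq_lettera_finale lista_stringhe out) := by unfold Spec_freq_lettera_finale; infer_instance

-- ===== CLAIM (what is proved, stated in full; the proofs are below) =====
def Claim_equal_freq_lettera_finale : Prop := ∀ (lista_stringhe : List String), Dom_freq_lettera_finale lista_stringhe → Pre_freq_lettera_finale lista_stringhe → Spec_freq_lettera_finale lista_stringhe (freq_lettera_finale lista_stringhe)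

-- ===== LEMMAS AND PROOFS =====

-- the common characterisation: c is the alphabetically smallest letter of maximal count in L ('z' for empty L)
def pvIsBest (L : List Char) (c : Char) : Prop :=
  (L = [] ∧ c = 'z') ∨
  (c ∈ L ∧ ∀ k ∈ L, L.count k ≤ L.count c ∧ (L.count k = L.count c → c ≤ k))

lemma pvBest_unique {L : List Char} {c₁ c₂ : Char}
    (h₁ : pvIsBest L c₁) (h₂ : pvIsBest L c₂) : c₁ = c₂ := by
  rcases h₁ with ⟨hL, h₁⟩ | ⟨hm₁, h₁⟩
  · rcases h₂ with ⟨_, h₂⟩ | ⟨hm₂, _⟩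
    · rw [h₁, h₂]
    · subst hL; simp at hm₂
  · rcases h₂ with ⟨hL, _⟩ | ⟨hm₂, h₂⟩
    · subst hL; simp at hm₁
    · have a₁ := h₁ c₂ hm₂
      have a₂ := h₂ c₁ hm₁
      have hcnt : L.count c₁ = L.count c₂ := le_antisymm a₂.1 a₁.1
      exact le_antisymm (a₁.2 hcnt.symm) (a₂.2 hcnt)

-- ---- A side ----
def pvInvA (cnt : Char → Int) (P : List Char) (st : Int × Char) : Prop :=
  (P = [] ∧ st = (0, 'z')) ∨
  (st.2 ∈ P ∧ st.1 = cnt st.2 ∧ ∀ k ∈ P, cnt k ≤ st.1 ∧ (cnt k = st.1 → st.2 ≤ k))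

lemma pvInvA_step (cnt : Char → Int) (P : List Char) (st : Int × Char) (k : Char)
    (hk : 1 ≤ cnt k) (h : pvInvA cnt P st) : pvInvA cnt (P ++ [k]) (pvStepA cnt st k) := by
  unfold pvInvA pvStepA
  rcases h with ⟨hP, hst⟩ | ⟨hmem, heq, hall⟩
  · subst hP hst
    simp only []
    rw [if_pos (by simpa using hk)]
    exact Or.inr (by simp)
  · by_cases h1 : cnt k > st.1
    · rw [if_pos h1]
      refine Or.inr ⟨by simp, rfl, ?_⟩
      intro j hj
      rcases List.mem_append.mp hj with hj | hj
      · have := (hall j hj).1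
        exact ⟨by omega, by omega⟩
      · simp at hj; subst hj; exact ⟨le_rfl, fun _ => le_rfl⟩
    · rw [if_neg h1]
      by_cases h2 : cnt k = st.1 ∧ st.2 > k
      · rw [if_pos h2]
        refine Or.inr ⟨by simp, h2.1.symm, ?_⟩
        intro j hj
        rcases List.mem_append.mp hj with hj | hj
        · refine ⟨(hall j hj).1, fun he => ?_⟩
          exact le_trans (le_of_lt h2.2) ((hall j hj).2 he)
        · simp at hj; subst hj; exact ⟨le_of_not_gt h1, fun _ => le_rfl⟩
      · rw [if_neg h2]
        refine Or.inr ⟨List.mem_append.mpr (Or.inl hmem), heq, ?_⟩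
        intro j hj
        rcases List.mem_append.mp hj with hj | hj
        · exact hall j hj
        · simp at hj; subst hj
          refine ⟨le_of_not_gt h1, fun he => ?_⟩
          rcases not_and_or.mp h2 with h | h
          · exact absurd he h
          · exact le_of_not_gt h
      
lemma pvInvA_fold (cnt : Char → Int) :
    ∀ (rest P : List Char) (st : Int × Char), pvInvA cnt P st → (∀ k ∈ rest, 1 ≤ cnt k) →
      pvInvA cnt (P ++ rest) (rest.foldl (pvStepA cnt) st) := by
  intro rest
  induction rest with
  | nil => intro P st h _; simpa using h
  | cons k rest ih =>
    intro P st h hpos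
    have h1 := pvInvA_step cnt P st k (hpos k (by simp)) h
    have h2 := ih (P ++ [k]) (pvStepA cnt st k) h1 (fun j hj => hpos j (by simp [hj]))
    simpa using h2

-- ---- B side ----
def pvInvB (P : List Char) (st : Char × Int × Option Char × Int) : Prop :=
  (P = [] ∧ st = ('z', 0, none, 0)) ∨
  (∃ lc, st.2.2.1 = some lc ∧ lc ∈ P ∧ (∀ x ∈ P, x ≤ lc) ∧ st.2.2.2 = (P.count lc : Int) ∧
    st.1 ∈ P ∧ st.2.1 = (P.count st.1 : Int) ∧
    ∀ k ∈ P, P.count k ≤ P.count st.1 ∧ (P.count k = P.count st.1 → st.1 ≤ k))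

lemma pvInvB_step (P : List Char) (st : Char × Int × Option Char × Int) (c : Char)
    (hmax : ∀ x ∈ P, x ≤ c) (h : pvInvB P st) : pvInvB (P ++ [c]) (pvStepB st c) := by
  unfold pvInvB pvStepB
  rcases h with ⟨hP, hst⟩ | ⟨lc, hrc, hlcm, hlcmax, hrl, hbm, hbc, hball⟩
  · subst hP hst
    exact Or.inr ⟨c, by simp⟩
  · have hc1 : (P ++ [c]).count c = P.count c + 1 := by simp
    by_cases hc : some c = st.2.2.1
    · -- c continues the run: c = lc
      have hceq : c = lc := by rw [hrc] at hc; exact Option.some.inj hc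
      subst hceq
      rw [if_pos hc, hrc, hrl]
      have hcnt' : ∀ k, k ≠ c → (P ++ [c]).count k = P.count k := by
        intro k hk; simp [List.count_append, Ne.symm hk]
      by_cases hgt : ((P.count c : Int) + 1) > st.2.1
      · rw [if_pos hgt]
        refine Or.inr ⟨c, rfl, by simp, ?_, by push_cast [hc1]; ring, by simp, by push_cast [hc1]; ring, ?_⟩
        · intro x hx
          rcases List.mem_append.mp hx with hx | hx
          · exact hlcmax x hx
          · simp at hx; subst hx; exact le_rfl
        · intro k hk
          by_cases hkc : k = c
          · subst hkc; exact ⟨le_rfl, fun _ => le_rfl⟩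
          · rcases List.mem_append.mp hk with hk | hk
            · have h1 := (hball k hk).1
              rw [hbc] at hgt
              have : P.count k < P.count c + 1 := by omega
              rw [hcnt' k hkc, hc1]
              exact ⟨by omega, by omega⟩
            · simp at hk; exact absurd hk hkc
      · rw [if_neg hgt]
        have hbnec : st.1 ≠ c := by
          intro he
          rw [hbc, he] at hgt; omega
        refine Or.inr ⟨c, rfl, by simp, ?_, by push_cast [hc1]; ring, List.mem_append.mpr (Or.inl hbm), ?_, ?_⟩
        · intro x hx
          rcases List.mem_append.mp hx with hx | hx
          · exact hlcmax x hx
          · simp at hx; subst hx; exact le_rfl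
        · rw [hcnt' st.1 hbnec]; exact hbc
        · intro k hk
          rw [hcnt' st.1 hbnec]
          by_cases hkc : k = c
          · subst hkc
            rw [hc1, hbc] at *
            refine ⟨by omega, fun _ => hlcmax st.1 hbm⟩
          · rcases List.mem_append.mp hk with hk | hk
            · rw [hcnt' k hkc]; exact hball k hk
            · simp at hk; exact absurd hk hkc
    · -- new run
      have hcnlc : c ≠ lc := by
        intro he; rw [hrc, he] at hc; exact hc rfl
      have hcnotP : c ∉ P := by
        intro hmem
        exact hcnlc (le_antisymm (hlcmax c hmem) (hmax lc hlcm))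
      have hcnt0 : P.count c = 0 := List.count_eq_zero.mpr hcnotP
      have hcnt' : ∀ k, k ≠ c → (P ++ [c]).count k = P.count k := by
        intro k hk; simp [List.count_append, Ne.symm hk]
      rw [if_neg hc]
      have hbpos : 1 ≤ P.count st.1 := List.count_pos_iff.mpr hbm
      have hgt : ¬ ((1 : Int) > st.2.1) := by rw [hbc]; omega
      rw [if_neg hgt]
      have hbnec : st.1 ≠ c := fun he => hcnotP (he ▸ hbm)
      refine Or.inr ⟨c, rfl, by simp, ?_, ?_, List.mem_append.mpr (Or.inl hbm), ?_, ?_⟩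
      · intro x hx
        rcases List.mem_append.mp hx with hx | hx
        · exact hmax x hx
        · simp at hx; subst hx; exact le_rfl
      · rw [hc1, hcnt0]; norm_num
      · rw [hcnt' st.1 hbnec]; exact hbc
      · intro k hk
        rw [hcnt' st.1 hbnec]
        by_cases hkc : k = c
        · subst hkc
          rw [hc1, hcnt0]
          exact ⟨by omega, fun _ => hmax st.1 hbm⟩
        · rcases List.mem_append.mp hk with hk | hk
          · rw [hcnt' k hkc]; exact hball k hk
          · simp at hk; exact absurd hk hkc

lemma pvInvB_fold :
    ∀ (rest P : List Char) (st : Char × Int × Option Char × Int),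
      (∀ x ∈ P, ∀ y ∈ rest, x ≤ y) → rest.Pairwise (· ≤ ·) → pvInvB P st →
      pvInvB (P ++ rest) (rest.foldl pvStepB st) := by
  intro rest
  induction rest with
  | nil => intro P st _ _ h; simpa using h
  | cons c rest ih =>
    intro P st hcross hpw h
    have h1 := pvInvB_step P st c (fun x hx => hcross x hx c (by simp)) h
    have hcross' : ∀ x ∈ P ++ [c], ∀ y ∈ rest, x ≤ y := by
      intro x hx y hy
      rcases List.mem_append.mp hx with hx | hx
      · exact hcross x hx y (by simp [hy])
      · simp at hx; subst hx
        exact (List.pairwise_cons.mp hpw).1 y hy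
    have h2 := ih (P ++ [c]) (pvStepB st c) hcross' (List.pairwise_cons.mp hpw).2 h1
    simpa using h2

-- ---- assembly ----
lemma pvA_best (L : List Char) :
    pvIsBest L (((PySem.Dict.counter L).keys.foldl
      (pvStepA (fun k => (PySem.Dict.counter L).getD k 0)) (0, 'z')).2) := by
  have hcnt : (fun k => (PySem.Dict.counter L).getD k 0) = fun k => (L.count k : Int) := by
    funext k; exact PySem.Dict.getD_counter L k
  rw [hcnt, PySem.Dict.keys_counter]
  have h0 : pvInvA (fun k => (L.count k : Int)) [] (0, 'z') := Or.inl ⟨rfl, rfl⟩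
  have hpos : ∀ k ∈ PySem.Set.ofList L, 1 ≤ ((L.count k : Int)) := by
    intro k hk
    have : k ∈ L := (PySem.Set.mem_ofList _ _).mp hk
    have := List.count_pos_iff.mpr this
    omega
  have h := pvInvA_fold (fun k => (L.count k : Int)) (PySem.Set.ofList L) [] (0, 'z') h0 hpos
  simp only [List.nil_append] at h
  rcases h with ⟨hks, hst⟩ | ⟨hmem, heq, hall⟩
  · left
    constructor
    · by_contra hL
      rcases List.exists_mem_of_ne_nil L hL with ⟨x, hx⟩
      have : x ∈ PySem.Set.ofList L := (PySem.Set.mem_ofList _ _).mpr hx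
      rw [hks] at this; simp at this
    · rw [hst]
  · right
    refine ⟨(PySem.Set.mem_ofList _ _).mp hmem, ?_⟩
    intro k hk
    have h := hall k ((PySem.Set.mem_ofList _ _).mpr hk)
    rw [heq] at h
    constructor
    · have h1 : (L.count k : Int) ≤ (L.count (((PySem.Set.ofList L).foldl (pvStepA fun k => ((L.count k : Int))) (0, 'z')).2) : Int) := h.1
      exact_mod_cast h1
    · intro he
      exact h.2 (congrArg (fun n : Nat => (n : Int)) he)

lemma pvB_best (L : List Char) :
    pvIsBest L ((PySem.List.sorted L (fun c => c) false).foldl pvStepB ('z', 0, none, 0)).1 := by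
  set S := PySem.List.sorted L (fun c => c) false with hS
  have hperm : S.Perm L := PySem.List.sorted_perm L (fun c => c) false
  have hpw : S.Pairwise (· ≤ ·) := by
    have := PySem.List.sorted_pairwise (xs := L) (key := fun c => c)
    simpa [hS] using this
  have h := pvInvB_fold S [] ('z', 0, none, 0) (by simp) hpw (Or.inl ⟨rfl, rfl⟩)
  simp only [List.nil_append] at h
  rcases h with ⟨hSnil, hst⟩ | ⟨lc, _, _, _, _, hbm, _, hball⟩
  · left
    refine ⟨?_, by rw [hst]⟩
    have := hperm
    rw [hSnil] at this
    exact (List.Perm.nil_eq this).symm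
  · right
    refine ⟨hperm.mem_iff.mp hbm, ?_⟩
    intro k hk
    have h := hball k (hperm.mem_iff.mpr hk)
    rw [hperm.count_eq, hperm.count_eq] at h
    exact h

-- ===== VERDICT (by name: the statement is the Claim_ definition above) =====
theorem freq_lettera_finale_spec : Claim_equal_freq_lettera_finale := by
  intro lista_stringhe _ _
  unfold Spec_freq_lettera_finale freq_lettera_finale freq_lettera_finale_alt
  have hd : lista_stringhe.foldl (fun d stringa =>
      let lettera := pvLast stringa
      d.insert lettera (d.getD lettera 0 + 1)) PySem.Dict.empty
      = PySem.Dict.counter (lista_stringhe.map pvLast) := by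
    rw [← PySem.Dict.foldl_insert_getD_add_one_eq_counter, List.foldl_map]
  simp only [hd]
  exact congrArg String.singleton
    (pvBest_unique (pvA_best (lista_stringhe.map pvLast)) (pvB_best (lista_stringhe.map pvLast)))
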